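-- pv_equiv track=rewrite | github.com/dumdumai/competitor-analysis | backend/agents/quality_agent.py | _extract_partnerships
-- ===== SOURCE A (Python) =====
-- from typing import Dict, Any, List
--
-- def _extract_partnerships(results: List[Dict[str, Any]]) -> List[str]:
--     """Extract partnership information"""
--     partnerships = []
--     partner_keywords = ['partnership', 'partner', 'collaboration', 'integration']
--
--     for result in results:
--         content = result.get('content', '')
--         title = result.get('title', '')
--         if any(keyword in content.lower() for keyword in partner_keywords):
--             # Simple extraction - could be enhanced
--             partnerships.append(f"Strategic partnerships mentioned")
--
--     return list(set(partnerships[:3]))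
-- ===== SOURCE B (Python) =====
-- from typing import Dict, Any, List
--
-- def _extract_partnerships(results: List[Dict[str, Any]]) -> List[str]:
--     """Extract partnership information (single existence check)."""
--     keywords = ('partnership', 'partner', 'collaboration', 'integration')
--     if any(kw in r.get('content', '').lower() for r in results for kw in keywords):
--         return ["Strategic partnerships mentioned"]
--     return []
-- ===== Notes on version B (the rewrite author's own statement) =====
-- stated objective: simpler
-- what changed: A appends the same constant string per matching result, slices to 3 and dedups via set; B collapses that accumulate+slice+set pipeline into one flat any(...) existence check returning either the empty list or the singleton message.
import Mathlib
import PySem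

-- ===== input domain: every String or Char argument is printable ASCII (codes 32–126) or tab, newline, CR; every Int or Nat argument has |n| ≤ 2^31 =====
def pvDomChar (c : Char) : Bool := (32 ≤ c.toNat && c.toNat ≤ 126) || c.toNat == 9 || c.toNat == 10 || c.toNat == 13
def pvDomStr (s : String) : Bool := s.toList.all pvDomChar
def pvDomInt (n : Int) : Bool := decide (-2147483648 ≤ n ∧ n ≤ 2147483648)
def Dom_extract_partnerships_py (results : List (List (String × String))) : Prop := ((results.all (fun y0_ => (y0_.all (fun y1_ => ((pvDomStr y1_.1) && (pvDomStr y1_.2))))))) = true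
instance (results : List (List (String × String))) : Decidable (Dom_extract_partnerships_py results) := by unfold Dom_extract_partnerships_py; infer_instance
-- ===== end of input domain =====

-- B replaces A's accumulate-constant/slice/set pipeline by a single existence check; return value only.

-- ===== PORT A =====
def extract_partnerships_py (results : List (List (String × String))) : List String :=
  -- partnerships = []; for result in results: content/title = result.get(...); append the constant on a hit
  let partnerships := results.foldl
    (fun acc result =>
      let content := PySem.Dict.getD (PySem.Dict.mk result) "content" ""
      let _title := PySem.Dict.getD (PySem.Dict.mk result) "title" ""
      if (["partnership", "partner", "collaboration", "integration"]).any
           (fun keyword => PySem.Str.isIn keyword (PySem.Str.lower content))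
      then acc ++ ["Strategic partnerships mentioned"] else acc) []
  -- return list(set(partnerships[:3]))
  PySem.Set.ofList (PySem.List.slice partnerships none (some 3))

-- ===== PORT B =====
def extract_partnerships_py_alt (results : List (List (String × String))) : List String :=
  if results.any (fun r =>
       (["partnership", "partner", "collaboration", "integration"]).any
         (fun kw => PySem.Str.isIn kw (PySem.Str.lower (PySem.Dict.getD (PySem.Dict.mk r) "content" ""))))
  then ["Strategic partnerships mentioned"] else []

-- ===== PRECONDITION & SPEC =====
def Spec_extract_partnerships_py (results : List (List (String × String))) (out : List String) : Prop := out = extract_partnerships_py_alt results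
instance (results : List (List (String × String))) (out : List String) : Decidable (Spec_extract_partnerships_py results out) := by unfold Spec_extract_partnerships_py; infer_instance

-- ===== CLAIM (what is proved, stated in full; the proofs are below) =====
def Claim_equal_extract_partnerships_py : Prop := ∀ (results : List (List (String × String))), Dom_extract_partnerships_py results → Spec_extract_partnerships_py results (extract_partnerships_py results)

-- ===== LEMMAS AND PROOFS =====

-- A's loop only ever appends the one constant string: its accumulator is acc ++ replicate (count of hits).
theorem pv_foldl_const {α β : Type} (p : α → Bool) (c : β) (results : List α) (acc : List β) :
    results.foldl (fun acc x => if p x then acc ++ [c] else acc) acc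
    = acc ++ List.replicate (results.countP p) c := by
  induction results generalizing acc with
  | nil => simp
  | cons r rs ih =>
    simp only [List.foldl_cons, List.countP_cons]
    by_cases h : p r = true
    · rw [if_pos h, ih, List.append_assoc]
      simp [h, List.replicate_succ]
    · rw [if_neg h, ih]
      simp [h]

-- set of a take-3 of a constant list: empty iff no hits, else the singleton.
theorem pv_set_take_replicate (n : ℕ) (c : String) :
    PySem.Set.ofList ((List.replicate n c).take 3)
    = if n = 0 then [] else [c] := by
  match n with
  | 0 => simp [PySem.Set.ofList]
  | 1 => simp [PySem.Set.ofList, PySem.Set.add, PySem.Set.contains, List.replicate]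
  | 2 => simp [PySem.Set.ofList, PySem.Set.add, PySem.Set.contains, List.replicate]
  | (k+3) =>
    have : (List.replicate (k+3) c).take 3 = [c, c, c] := by
      simp [List.take_replicate]
    rw [this]
    simp [PySem.Set.ofList, PySem.Set.add, PySem.Set.contains]

-- slice [:3] with the literal bound 3 is take 3
theorem pv_slice3 (xs : List String) : PySem.List.slice xs none (some 3) = xs.take 3 := by
  rw [PySem.List.slice_to xs (by norm_num)]
  rfl

-- for a constant-appended list: nonempty-count test equals the existence test
theorem pv_count_any {α β : Type} (p : α → Bool) (c : β) (l : List α) :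
    (if l.countP p = 0 then ([] : List β) else [c]) = if l.any p then [c] else [] := by
  by_cases h : l.any p = true
  · have hne : l.countP p ≠ 0 := by
      obtain ⟨x, hx, hpx⟩ := List.any_eq_true.mp h
      have := List.countP_pos_iff.mpr ⟨x, hx, hpx⟩
      omega
    simp [h, hne]
  · have h0 : l.countP p = 0 := by
      simp only [Bool.not_eq_true] at h
      exact List.countP_eq_zero.mpr (by
        intro x hx
        simpa using List.any_eq_false.mp h x hx)
    simp [h0, h]

-- ===== VERDICT (by name: the statement is the Claim_ definition above) =====
theorem extract_partnerships_py_spec : Claim_equal_extract_partnerships_py := by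
  intro results _
  unfold Spec_extract_partnerships_py extract_partnerships_py extract_partnerships_py_alt
  simp only [pv_foldl_const, List.nil_append, pv_slice3, pv_set_take_replicate, pv_count_any]
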